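-- pv_equiv track=rewrite | github.com/chandrasekharreddy-7/python | mid/6.py | move_dups
-- ===== SOURCE A (Python) =====
-- def move_dups(string):
--     new_str = ""
--     new_str1 = ""
--     for i in string:
--         if i not in new_str:
--             new_str += i
--         else:
--             new_str1 += i
--     return new_str + '_' + new_str1
-- ===== SOURCE B (Python) =====
-- def move_dups(string):
--     uniq = ''.join(dict.fromkeys(string))
--     rem = list(string)
--     for c in uniq:
--         rem.remove(c)
--     return uniq + '_' + ''.join(rem)
-- ===== Notes on version B (the rewrite author's own statement) =====
-- stated objective: alternative
-- what changed: Replaces A's single classifying pass (grow a seen-string, route each char into uniq or dups) by a dedup pass (dict.fromkeys) plus a complement pass that deletes each distinct char's first occurrence from a copy of the input, leaving exactly the repeats.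
import Mathlib
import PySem

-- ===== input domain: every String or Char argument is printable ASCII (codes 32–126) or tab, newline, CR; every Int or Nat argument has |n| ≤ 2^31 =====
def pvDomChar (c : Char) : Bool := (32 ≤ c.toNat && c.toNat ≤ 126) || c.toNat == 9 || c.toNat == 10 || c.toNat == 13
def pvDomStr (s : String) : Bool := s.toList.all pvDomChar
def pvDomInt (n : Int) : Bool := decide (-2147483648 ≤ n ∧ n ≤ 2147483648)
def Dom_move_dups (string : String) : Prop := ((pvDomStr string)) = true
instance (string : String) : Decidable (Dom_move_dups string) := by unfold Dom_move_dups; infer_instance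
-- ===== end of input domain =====

-- B replaces A's single classifying pass by a dedup pass (dict.fromkeys) plus a
-- complement pass removing each distinct char's first occurrence (objective: alternative).


-- ===== PORT A =====
-- 'i not in new_str' on a one-char i is exactly char-list membership (contains).
def move_dups (string : String) : String :=
  let p := string.toList.foldl
    (fun (p : List Char × List Char) i =>
      if !p.1.contains i then (p.1 ++ [i], p.2) else (p.1, p.2 ++ [i]))
    ([], [])
  String.ofList (p.1 ++ '_' :: p.2)

-- ===== PORT B =====
-- ''.join(dict.fromkeys(string)) is PySem.List.dedup; rem.remove(c) is
-- PySem.List.remove? (the 'none' branch = ValueError is unreachable: every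
-- dedup element occurs in the list).
def pvStep (rem : List Char) (c : Char) : List Char :=
  match PySem.List.remove? rem c with
  | some r => r
  | none => rem

def move_dups_alt (string : String) : String :=
  let uniq := PySem.List.dedup string.toList
  let rem := uniq.foldl pvStep string.toList
  String.ofList (uniq ++ '_' :: rem)

-- ===== PRECONDITION & SPEC =====
def Spec_move_dups (string : String) (out : String) : Prop := out = move_dups_alt string
instance (string : String) (out : String) : Decidable (Spec_move_dups string out) := by unfold Spec_move_dups; infer_instance

-- ===== CLAIM (what is proved, stated in full; the proofs are below) =====
def Claim_equal_move_dups : Prop := ∀ (string : String), Dom_move_dups string → Spec_move_dups string (move_dups string)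

-- ===== LEMMAS AND PROOFS =====

-- dedup of l relative to a seen-list, and the complementary dup occurrences
def pvDD (seen : List Char) : List Char → List Char
  | [] => []
  | c :: t => if !seen.contains c then c :: pvDD (seen ++ [c]) t else pvDD seen t

def pvDU (seen : List Char) : List Char → List Char
  | [] => []
  | c :: t => if !seen.contains c then pvDU (seen ++ [c]) t else c :: pvDU seen t

theorem pvDD_not_mem (seen l : List Char) (c : Char) (h : c ∈ pvDD seen l) : c ∉ seen := by
  induction l generalizing seen with
  | nil => simp [pvDD] at h
  | cons x t ih =>
    by_cases hx : x ∈ seen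
    · simp [pvDD, hx] at h
      exact ih _ h
    · simp [pvDD, hx] at h
      rcases h with h | h
      · subst h; exact hx
      · intro hc; exact (ih _ h) (List.mem_append_left _ hc)

theorem pvA_fold (l s s1 : List Char) :
    l.foldl (fun (p : List Char × List Char) i =>
      if !p.1.contains i then (p.1 ++ [i], p.2) else (p.1, p.2 ++ [i])) (s, s1)
    = (s ++ pvDD s l, s1 ++ pvDU s l) := by
  induction l generalizing s s1 with
  | nil => simp [pvDD, pvDU]
  | cons c t ih =>
    by_cases hc : c ∈ s
    · rw [List.foldl_cons]
      have hstep : (if (!(s, s1).1.contains c) = true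
          then ((s, s1).1 ++ [c], (s, s1).2) else ((s, s1).1, (s, s1).2 ++ [c]))
          = (s, s1 ++ [c]) := by simp [hc]
      rw [hstep, ih]
      simp [pvDD, pvDU, hc, List.append_assoc]
    · rw [List.foldl_cons]
      have hstep : (if (!(s, s1).1.contains c) = true
          then ((s, s1).1 ++ [c], (s, s1).2) else ((s, s1).1, (s, s1).2 ++ [c]))
          = (s ++ [c], s1) := by simp [hc]
      rw [hstep, ih]
      simp [pvDD, pvDU, hc, List.append_assoc]

theorem pvStep_cons_ne (t : List Char) (c d : Char) (h : d ≠ c) :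
    pvStep (c :: t) d = c :: pvStep t d := by
  have := PySem.List.remove?_cons_of_ne (xs := t) (x := c) (v := d) (by simpa using (Ne.symm h))
  unfold pvStep
  rw [this]
  cases PySem.List.remove? t d <;> simp

theorem pvFold_past (u t : List Char) (c : Char) (h : ∀ d ∈ u, d ≠ c) :
    u.foldl pvStep (c :: t) = c :: u.foldl pvStep t := by
  induction u generalizing t with
  | nil => simp
  | cons d u' ih =>
    simp only [List.foldl_cons]
    rw [pvStep_cons_ne t c d (h d (by simp))]
    exact ih _ (fun e he => h e (by simp [he]))

theorem pvRemove_fold (l seen : List Char) :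
    (pvDD seen l).foldl pvStep l = pvDU seen l := by
  induction l generalizing seen with
  | nil => simp [pvDD, pvDU]
  | cons c t ih =>
    by_cases hc : c ∈ seen
    · have hne : ∀ d ∈ pvDD seen t, d ≠ c := fun d hd => by
        intro he; subst he; exact pvDD_not_mem seen t d hd hc
      simp only [pvDD, pvDU, List.contains_eq_mem, hc, decide_true, Bool.not_true,
        Bool.false_eq_true, if_false]
      rw [pvFold_past _ _ _ hne, ih]
    · simp only [pvDD, pvDU, List.contains_eq_mem, hc, decide_false, Bool.not_false, if_true,
        List.foldl_cons]
      have hstep : pvStep (c :: t) c = t := by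
        unfold pvStep
        rw [PySem.List.remove?_cons_self]
      rw [hstep]
      exact ih _

theorem pvFoldAdd_eq (l seen : List Char) :
    l.foldl PySem.Set.add seen = seen ++ pvDD seen l := by
  induction l generalizing seen with
  | nil => simp [pvDD]
  | cons c t ih =>
    by_cases hc : c ∈ seen
    · simp only [List.foldl_cons, PySem.Set.add_of_mem hc]
      rw [ih]
      simp [pvDD, hc]
    · simp only [List.foldl_cons, PySem.Set.add_of_not_mem hc]
      rw [ih]
      simp [pvDD, hc, List.append_assoc]

theorem pvDedup_eq (l : List Char) : PySem.List.dedup l = pvDD [] l := by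
  rw [PySem.List.dedup_eq_ofList, PySem.Set.ofList_eq_foldl, pvFoldAdd_eq]
  simp

-- ===== VERDICT (by name: the statement is the Claim_ definition above) =====
theorem move_dups_spec : Claim_equal_move_dups := by
  intro s _
  unfold Spec_move_dups move_dups move_dups_alt
  simp only [pvA_fold, pvDedup_eq, pvRemove_fold]
  simp
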